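-- pv_equiv track=rewrite | github.com/neynt/dotfiles3 | bin/troubador.py | append_cost
-- ===== SOURCE A (Python) =====
-- def append_cost(s):
--     cost = len(s) * len(s)
--     for c in s:
--         if c.isdecimal():
--             cost += 1
--         else:
--             cost += 5
--     return cost
-- ===== SOURCE B (Python) =====
-- def append_cost(s):
--     # one substring-count per digit character (C-level), then the closed form
--     # n*n + 5*n - 4*d (each char costs 5 on top of the quadratic base, each
--     # decimal char gets a 4 discount)
--     n = len(s)
--     d = sum(s.count(ch) for ch in '0123456789')
--     return n * n + 5 * n - 4 * d
-- ===== Notes on version B (the rewrite author's own statement) =====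
-- stated objective: faster
-- what changed: removes the per-character branch accumulation: B runs ten substring counts (one per digit character '0'..'9') and plugs the total into the closed form n*n + 5*n - 4*d
import Mathlib
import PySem

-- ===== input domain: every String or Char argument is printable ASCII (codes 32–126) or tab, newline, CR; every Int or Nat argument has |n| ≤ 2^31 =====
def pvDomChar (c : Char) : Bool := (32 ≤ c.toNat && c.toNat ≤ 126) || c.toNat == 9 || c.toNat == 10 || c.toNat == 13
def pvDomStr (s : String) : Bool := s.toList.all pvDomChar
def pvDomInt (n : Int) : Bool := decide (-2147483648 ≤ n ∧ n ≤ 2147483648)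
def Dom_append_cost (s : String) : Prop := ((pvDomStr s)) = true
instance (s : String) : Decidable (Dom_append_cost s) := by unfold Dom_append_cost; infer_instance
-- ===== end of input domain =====

-- B drops A's per-character if/else accumulation: it runs one substring count per
-- digit character '0'..'9' and plugs the total into the closed form n*n + 5*n - 4*d
-- (objective: faster by a constant factor, measured).
-- On the ASCII domain c.isdecimal() is exactly '0' ≤ c ≤ '9'.

-- ===== PORT A =====
def append_cost (s : String) : Int :=
  let cost : Int := PySem.Str.len s * PySem.Str.len s
  s.toList.foldl (fun cost c => if PySem.Chars.isdigit c then cost + 1 else cost + 5) cost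

-- ===== PORT B =====
def append_cost_alt (s : String) : Int :=
  let n : Int := PySem.Str.len s
  let d : Int := ("0123456789".toList.map (fun ch => (PySem.Str.count s (String.ofList [ch]) : Int))).sum
  n * n + 5 * n - 4 * d

-- ===== PRECONDITION & SPEC =====
def Spec_append_cost (s : String) (out : Int) : Prop := out = append_cost_alt s
instance (s : String) (out : Int) : Decidable (Spec_append_cost s out) := by unfold Spec_append_cost; infer_instance

-- ===== CLAIM =====
def Claim_equal_append_cost : Prop := ∀ (s : String), Dom_append_cost s → Spec_append_cost s (append_cost s)

-- ===== LEMMAS AND PROOFS =====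

-- A's loop in closed form
theorem append_cost_foldl (L : List Char) (a : Int) :
    L.foldl (fun cost c => if PySem.Chars.isdigit c then cost + 1 else cost + 5) a
      = a + 5 * L.length - 4 * (L.countP (fun c => PySem.Chars.isdigit c) : Int) := by
  induction L generalizing a with
  | nil => simp
  | cons c t ih =>
    simp only [List.foldl_cons, List.countP_cons, ih]
    by_cases h : PySem.Chars.isdigit c = true <;> simp [h] <;> ring

-- Python's s.count(ch) for a one-character needle is plain character counting
theorem count_go_singleton (c : Char) (l : List Char) (fuel acc : Nat) (h : l.length ≤ fuel) :
    PySem.Chars.count.go [c] fuel l acc = acc + l.count c := by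
  induction l generalizing fuel acc with
  | nil => cases fuel <;> simp [PySem.Chars.count.go]
  | cons x t ih =>
    cases fuel with
    | zero => simp at h
    | succ f =>
      simp only [List.length_cons, Nat.succ_le_succ_iff] at h
      rw [PySem.Chars.count.go]
      by_cases hx : x = c
      · simp [hx, List.isPrefixOf, ih _ _ h]
        omega
      · have : [c].isPrefixOf (x :: t) = false := by
          simp [List.isPrefixOf]; exact fun hh => hx hh.symm
        simp [this, ih _ _ h, hx]

theorem count_singleton (c : Char) (l : List Char) :
    PySem.Chars.count l [c] = l.count c := by
  simp [PySem.Chars.count]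
  have := count_go_singleton c l l.length 0 le_rfl
  omega

theorem digits_toList : "0123456789".toList = ['0','1','2','3','4','5','6','7','8','9'] := by decide

theorem mem_digits_iff (x : Char) : (x ∈ "0123456789".toList) ↔ PySem.Chars.isdigit x = true := by
  rw [digits_toList]
  constructor
  · intro h
    simp at h
    rcases h with h|h|h|h|h|h|h|h|h|h <;> subst h <;> decide
  · intro h
    simp [PySem.Chars.isdigit, Char.le_def] at h
    have hofn : x = Char.ofNat x.toNat := (Char.ofNat_toNat x).symm
    have h48 : 48 ≤ x.toNat := h.1
    have h57 : x.toNat ≤ 57 := h.2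
    interval_cases hx : x.toNat <;> rw [hofn] <;> decide

-- summing l.count over a duplicate-free alphabet D is countP (· ∈ D)
theorem sum_counts (D : List Char) (hD : D.Nodup) (l : List Char) :
    (D.map (fun ch => l.count ch)).sum = l.countP (fun c => decide (c ∈ D)) := by
  induction l with
  | nil => simp
  | cons x t ih =>
    have hsum : (D.map (fun ch => (x :: t).count ch)).sum
        = (D.map (fun ch => t.count ch)).sum + (D.map (fun ch => if x = ch then 1 else 0)).sum := by
      rw [← List.sum_map_add]
      congr 1
      apply List.map_congr_left
      intro ch _
      by_cases h : x = ch <;> simp [List.count_cons, h]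
    have hind : (D.map (fun ch => if x = ch then 1 else 0)).sum = (if x ∈ D then 1 else 0) := by
      clear hsum ih
      induction D with
      | nil => simp
      | cons y D' ihD =>
        have hy : D'.Nodup := hD.of_cons
        simp only [List.map_cons, List.sum_cons, ihD hy, List.mem_cons]
        by_cases h : x = y
        · subst h
          have : x ∉ D' := (List.nodup_cons.mp hD).1
          simp [this]
        · simp [h, Ne.symm h]
    rw [hsum, hind, ih, List.countP_cons]
    by_cases h : x ∈ D <;> simp [h]

-- ===== VERDICT =====
theorem append_cost_spec : Claim_equal_append_cost := by
  intro s _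
  unfold Spec_append_cost append_cost append_cost_alt
  have hmap : ("0123456789".toList.map (fun ch => (PySem.Str.count s (String.ofList [ch]) : Int)))
      = ("0123456789".toList.map (fun ch => s.toList.count ch)).map (fun n : Nat => (n : Int)) := by
    rw [List.map_map]
    apply List.map_congr_left
    intro ch _
    simp [PySem.Str.count, count_singleton]
  have hcast : (("0123456789".toList.map (fun ch => s.toList.count ch)).map (fun n : Nat => (n : Int))).sum
      = ((("0123456789".toList.map (fun ch => s.toList.count ch)).sum : Nat) : Int) := by
    rw [Nat.cast_list_sum]
  have hnd : ("0123456789".toList).Nodup := by decide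
  have h2 := sum_counts "0123456789".toList hnd s.toList
  have h3 : s.toList.countP (fun c => decide (c ∈ "0123456789".toList))
      = s.toList.countP (fun c => PySem.Chars.isdigit c) := by
    apply List.countP_congr
    intro c _
    have := mem_digits_iff c
    by_cases hc : c ∈ "0123456789".toList <;> simp_all
  have hd : ("0123456789".toList.map (fun ch => (PySem.Str.count s (String.ofList [ch]) : Int))).sum
      = (s.toList.countP (fun c => PySem.Chars.isdigit c) : Int) := by
    rw [hmap, hcast, h2, h3]
  simp only [hd, append_cost_foldl, PySem.Str.len]
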